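-- pv_equiv track=rewrite | github.com/KratosMultiphysics/Kratos | utilities/python/plot_settings.py | ReplaceEngineeringNotation
-- ===== SOURCE A (Python) =====
-- def ReplaceEngineeringNotation(text: str) -> str:
--     index = text.find("e-")
--     while (index > -1):
--         end_index = index
--         for i in range(index + 2, len(text)):
--             try:
--                 _temp = int(text[i])
--             except:
--                 end_index = i
--                 break
--
--         text = text[:index] + r"\times 10^{-" + str(
--             int(text[index + 2:end_index])) + "}" + text[end_index:]
--         index = text.find("e-")
--
--     return text
-- ===== SOURCE B (Python) =====
-- def ReplaceEngineeringNotation(text: str) -> str: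
--     # One left-to-right pass: a piece buffer and a cursor instead of repeated
--     # whole-string find() + whole-string reconstruction.
--     pieces = []
--     pos = 0
--     while True:
--         idx = text.find("e-", pos)
--         if idx == -1:
--             pieces.append(text[pos:])
--             return "".join(pieces)
--         run = []
--         j = idx + 2
--         while j < len(text):
--             try:
--                 int(text[j])
--             except ValueError:
--                 break
--             run.append(text[j])
--             j += 1
--         if not run:
--             # no exponent digits after 'e-': leave it unchanged
--             pieces.append(text[pos:idx + 2])
--             pos = idx + 2
--         else:
--             pieces.append(text[pos:idx])
--             pieces.append("\\times 10^{-" + str(int("".join(run))) + "}")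
--             pos = j
-- ===== Notes on version B (the rewrite author's own statement) =====
-- stated objective: alternative
-- what changed: B makes one left-to-right pass with a cursor and a piece buffer (find from the cursor, emit prefix piece + replacement, continue after the digit run) instead of A's loop that re-finds from position 0 and rebuilds the whole string on every replacement.
-- outside the precondition, e.g. on ReplaceEngineeringNotation('e-'): A raises ValueError, B returns 'e-'
import Mathlib
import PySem

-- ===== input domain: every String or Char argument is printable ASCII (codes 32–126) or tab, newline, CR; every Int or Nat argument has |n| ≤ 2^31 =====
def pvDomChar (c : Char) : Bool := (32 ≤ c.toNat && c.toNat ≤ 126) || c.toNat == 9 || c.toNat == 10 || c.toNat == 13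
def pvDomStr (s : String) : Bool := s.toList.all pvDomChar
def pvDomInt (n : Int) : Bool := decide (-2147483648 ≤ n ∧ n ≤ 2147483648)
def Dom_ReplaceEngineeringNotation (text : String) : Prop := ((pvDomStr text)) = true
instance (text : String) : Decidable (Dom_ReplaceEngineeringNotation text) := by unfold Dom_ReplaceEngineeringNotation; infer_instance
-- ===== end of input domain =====

-- B replaces A's repeated whole-string find()+rebuild loop by one left-to-right pass with a
-- piece buffer and a cursor (alternative single-pass algorithm; same return value on Pre_).

-- ===== PORT A =====
-- shared by both ports: the replacement text r"\times 10^{-" + str(n) + "}" as characters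
def pvRepl (n : Int) : List Char :=
  ['\\', 't', 'i', 'm', 'e', 's', ' ', '1', '0', '^', '{', '-'] ++ PySem.Int.toChars n ++ ['}']

-- A's inner for-loop over range(index+2, len(text)): first index ≥ m where int(text[i]) fails
-- (none: the loop ran off the end without a break).  `try: int(text[i])` on a single printable
-- ASCII character succeeds exactly for '0'..'9', i.e. Char.isDigit.
def pvScanA (cs : List Char) (m : Nat) : Option Nat :=
  if h : m < cs.length then
    if (cs[m]'h).isDigit then pvScanA cs (m + 1) else some m
  else none
termination_by cs.length - m

-- the while loop of A; one fuel unit per iteration (each iteration consumes one "e-"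
-- occurrence, so `length + 1` fuel is never exhausted on inputs where Python returns)
def pvLoopA : Nat → List Char → List Char
  | 0, cs => cs
  | fuel + 1, cs =>
    let index := PySem.Chars.find cs ['e', '-']
    if index > -1 then
      let i := index.toNat
      let endIndex := (pvScanA cs (i + 2)).getD i   -- end_index = index, then the for-loop
      match PySem.Int.ofChars? (PySem.List.slice cs (some ((i : Int) + 2)) (some (endIndex : Int))) with
      | none => cs          -- int('') raises ValueError in Python; Pre_ excludes these inputs
      | some n =>
        pvLoopA fuel (PySem.List.slice cs none (some (i : Int)) ++ pvRepl n ++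
                      PySem.List.slice cs (some (endIndex : Int)) none)
    else cs

def ReplaceEngineeringNotation (text : String) : String :=
  String.ofList (pvLoopA (text.toList.length + 1) text.toList)

-- ===== PORT B =====
-- single pass: emit the piece before each occurrence, then the replacement, and continue
-- after the digit run (the cursor `pos` of Source B is represented by dropping the consumed
-- prefix; one fuel unit per loop iteration — each iteration consumes one "e-" occurrence,
-- so `length + 1` fuel is never exhausted)
def pvLoopB : Nat → List Char → List Char
  | 0, cs => cs
  | fuel + 1, cs =>
    let idx := PySem.Chars.find cs ['e', '-']
    if idx > -1 then
      let i := idx.toNat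
      let run := (cs.drop (i + 2)).takeWhile Char.isDigit
      if run = [] then
        cs.take (i + 2) ++ pvLoopB fuel (cs.drop (i + 2))  -- no exponent digits: keep "e-" as is
      else
        match PySem.Int.ofChars? run with
        | none => cs      -- unreachable: run is a nonempty string of decimal digits
        | some n => cs.take i ++ pvRepl n ++ pvLoopB fuel (cs.drop (i + 2 + run.length))
    else cs

def ReplaceEngineeringNotation_alt (text : String) : String :=
  String.ofList (pvLoopB (text.toList.length + 1) text.toList)

-- ===== PRECONDITION & SPEC =====
-- Python A raises ValueError (int('')) at an "e-" followed by no digit, and at an "e-" whose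
-- digit run reaches the end of the string (the for-loop then never breaks and end_index stays
-- at index); Pre_ admits exactly the strings where every "e-" is followed by a nonempty digit
-- run that ends before the end of the string — all inputs on which A returns.
def Pre_ReplaceEngineeringNotation (text : String) : Prop :=
  ∀ i < text.toList.length,
    text.toList.getD i ' ' = 'e' → text.toList.getD (i + 1) ' ' = '-' →
      ((text.toList.getD (i + 2) ' ').isDigit = true ∧
       ∃ j < text.toList.length, i + 2 < j ∧ (text.toList.getD j ' ').isDigit = false)
instance (text : String) : Decidable (Pre_ReplaceEngineeringNotation text) := by
  unfold Pre_ReplaceEngineeringNotation; infer_instance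

def pvWitness_ReplaceEngineeringNotation : String := "a 1.5e-10 b"

def Spec_ReplaceEngineeringNotation (text : String) (out : String) : Prop :=
  out = ReplaceEngineeringNotation_alt text
instance (text : String) (out : String) : Decidable (Spec_ReplaceEngineeringNotation text out) := by
  unfold Spec_ReplaceEngineeringNotation; infer_instance

-- ===== CLAIM (what is proved, stated in full; the proofs are below) =====
def Claim_equal_ReplaceEngineeringNotation : Prop :=
  ∀ (text : String), Dom_ReplaceEngineeringNotation text →
    Pre_ReplaceEngineeringNotation text →
      Spec_ReplaceEngineeringNotation text (ReplaceEngineeringNotation text)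

-- ===== LEMMAS AND PROOFS =====

-- the precondition, stated on the character list
def pvPreL (cs : List Char) : Prop :=
  ∀ i < cs.length, cs.getD i ' ' = 'e' → cs.getD (i + 1) ' ' = '-' →
    ((cs.getD (i + 2) ' ').isDigit = true ∧
     ∃ j < cs.length, i + 2 < j ∧ (cs.getD j ' ').isDigit = false)

-- number of "e-" occurrences (the measure the fuel of pvLoopA dominates)
def pvOcc (cs : List Char) : Nat :=
  (List.range cs.length).countP (fun p => decide (['e', '-'] <+: cs.drop p))

theorem pvOccAt_iff (cs : List Char) (i : Nat) :
    ['e', '-'] <+: cs.drop i ↔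
      (cs.getD i ' ' = 'e' ∧ cs.getD (i + 1) ' ' = '-' ∧ i + 1 < cs.length) := by
  have e0 : cs.getD i ' ' = ((cs.drop i)[0]?).getD ' ' := by
    simp [List.getD_eq_getElem?_getD, List.getElem?_drop]
  have e1 : cs.getD (i + 1) ' ' = ((cs.drop i)[1]?).getD ' ' := by
    simp [List.getD_eq_getElem?_getD, List.getElem?_drop]
  have e2 : (cs.drop i).length = cs.length - i := by simp
  rw [e0, e1]
  rcases hd : cs.drop i with - | ⟨a, - | ⟨b, t⟩⟩ <;> rw [hd] at e2 <;> simp at e2 ⊢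
  constructor
  · rintro ⟨rfl, rfl⟩; exact ⟨rfl, rfl, by omega⟩
  · rintro ⟨rfl, rfl, -⟩; exact ⟨rfl, rfl⟩

-- getD of a dropped list, as getD of the original
theorem pvGetD_drop (cs : List Char) (k m : Nat) :
    (cs.drop k).getD m ' ' = cs.getD (k + m) ' ' := by
  simp [List.getD_eq_getElem?_getD, List.getElem?_drop]

-- getD past an untouched prefix
theorem pvGetD_append_right (q d : List Char) (m : Nat) :
    (q ++ d).getD (q.length + m) ' ' = d.getD m ' ' := by
  simp [List.getD_eq_getElem?_getD, List.getElem?_append_right (Nat.le_add_right q.length m)]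

theorem pvPreL_drop (cs : List Char) (k : Nat) (h : pvPreL cs) : pvPreL (cs.drop k) := by
  intro i hi he hd
  rw [List.length_drop] at hi
  rw [pvGetD_drop] at he hd
  rw [show k + (i + 1) = (k + i) + 1 from by omega] at hd
  obtain ⟨hdig, j, hj, hij, hnd⟩ := h (k + i) (by omega) he hd
  refine ⟨by rw [pvGetD_drop, show k + (i + 2) = (k + i) + 2 from by omega]; exact hdig,
          j - k, by simp; omega, by omega, ?_⟩
  rw [pvGetD_drop, show k + (j - k) = j from by omega]
  exact hnd

theorem pvScanA_spec (cs : List Char) (m : Nat) :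
    pvScanA cs m =
      if m + ((cs.drop m).takeWhile Char.isDigit).length < cs.length
      then some (m + ((cs.drop m).takeWhile Char.isDigit).length) else none := by
  fun_induction pvScanA cs m with
  | case1 m h hd ih =>
    rw [List.drop_eq_getElem_cons h]
    simp only [List.takeWhile_cons, hd, if_true, List.length_cons, ih]
    generalize ((cs.drop (m + 1)).takeWhile Char.isDigit).length = L
    rw [show m + (L + 1) = m + 1 + L from by omega]
  | case2 m h hd =>
    rw [List.drop_eq_getElem_cons h]
    simp only [List.takeWhile_cons, hd, if_false, Bool.false_eq_true, List.length_nil]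
    simp [h]
  | case3 m h =>
    rw [List.drop_of_length_le (by omega)]
    simp; omega

theorem pvFind_eq_of_first (cs pat : List Char) (m : Nat) (hm : pat <+: cs.drop m)
    (hmin : ∀ p < m, ¬ pat <+: cs.drop p) : PySem.Chars.find cs pat = (m : Int) := by
  have hin : PySem.Chars.isIn pat cs = true :=
    (PySem.Chars.exists_prefix_drop_iff_isIn pat cs).mp ⟨m, hm⟩
  have h0 : 0 ≤ PySem.Chars.find cs pat :=
    (PySem.Chars.find_nonneg_iff _ _).mpr ((PySem.Chars.isIn_iff_infix _ _).mp hin)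
  obtain ⟨hf, hfmin⟩ := PySem.Chars.find_spec h0
  have h1 : ¬ (PySem.Chars.find cs pat).toNat < m := fun h => hmin _ h hf
  have h2 : ¬ m < (PySem.Chars.find cs pat).toNat := fun h => hfmin m h hm
  omega

theorem pvToDigitsCore_digits (b : Nat) (hb : b = 10) : ∀ (fuel v : Nat) (ds : List Char),
    (∀ c ∈ ds, c.isDigit = true) → ∀ c ∈ Nat.toDigitsCore b fuel v ds, c.isDigit = true := by
  intro fuel
  induction fuel with
  | zero => intro v ds hds c hc; rw [Nat.toDigitsCore] at hc; exact hds c hc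
  | succ f ih =>
    intro v ds hds c hc
    rw [Nat.toDigitsCore] at hc
    have hdig : ((v % b).digitChar).isDigit = true := by
      subst hb
      have : v % 10 < 10 := Nat.mod_lt _ (by omega)
      set r := v % 10 with hr
      interval_cases r <;> decide
    by_cases hz : v / b = 0
    · rw [if_pos hz] at hc
      rcases List.mem_cons.mp hc with rfl | hc
      · exact hdig
      · exact hds c hc
    · rw [if_neg hz] at hc
      refine ih (v / b) _ ?_ c hc
      intro c' hc'
      rcases List.mem_cons.mp hc' with rfl | hc'
      · exact hdig
      · exact hds c' hc'

-- characters of str(n) are digits or '-' — in particular never 'e'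
theorem pvToChars_no_e (n : Int) (c : Char) (hc : c ∈ PySem.Int.toChars n) : c ≠ 'e' := by
  have hd : ∀ (v : Nat) (c' : Char), c' ∈ Nat.toDigits 10 v → c'.isDigit = true := by
    intro v c' h
    exact pvToDigitsCore_digits 10 rfl (v + 1) v [] (by simp) c' h
  unfold PySem.Int.toChars at hc
  intro rfl
  split at hc
  · rcases List.mem_cons.mp hc with h | h
    · exact absurd h (by decide)
    · exact absurd (hd _ _ h) (by decide)
  · exact absurd (hd _ _ hc) (by decide)

-- a prefix `q` that contains no "e-" occurrence (also none across its boundary)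
def pvClean (q d : List Char) : Prop := ∀ p < q.length, ¬ ['e', '-'] <+: (q ++ d).drop p

-- getD within an untouched prefix
theorem pvGetD_append_left (q d : List Char) (m : Nat) (h : m < q.length) :
    (q ++ d).getD m ' ' = q.getD m ' ' := by
  simp [List.getD_eq_getElem?_getD, List.getElem?_append_left h]

theorem pvGetD_take (cs : List Char) (i m : Nat) (h : m < i) :
    (cs.take i).getD m ' ' = cs.getD m ' ' := by
  simp [List.getD_eq_getElem?_getD, List.getElem?_take_of_lt h]

theorem pvClean_repl (cs d : List Char) (i : Nat) (n : Int)
    (hm : ∀ p < i, ¬ ['e', '-'] <+: cs.drop p) (hi : i ≤ cs.length) :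
    pvClean (cs.take i ++ pvRepl n) d := by
  intro p hp hpat
  have hti : (cs.take i).length = i := by simp [hi]
  have hlq : (cs.take i ++ pvRepl n).length = i + (13 + (PySem.Int.toChars n).length) := by
    simp [pvRepl, hti]
    omega
  obtain ⟨h1, h2, h3⟩ := (pvOccAt_iff ((cs.take i ++ pvRepl n) ++ d) p).mp hpat
  rw [List.append_assoc] at h1 h2
  rcases Nat.lt_trichotomy (p + 1) i with hp1 | hp1 | hp1
  · -- the occurrence would lie inside cs.take i: an "e-" in cs before position i
    rw [pvGetD_append_left _ _ _ (by omega), pvGetD_take _ _ _ (by omega)] at h1 h2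
    exact hm p (by omega) ((pvOccAt_iff cs p).mpr ⟨h1, h2, by omega⟩)
  · -- p + 1 = i: the '-' would have to be the first replacement char '\'
    rw [show p + 1 = (cs.take i).length + 0 from by omega, pvGetD_append_right] at h2
    rw [show (pvRepl n ++ d).getD 0 ' ' = '\\' from by simp [pvRepl]] at h2
    exact absurd h2 (by decide)
  · -- the 'e' lies inside the replacement text
    obtain ⟨z, rfl⟩ : ∃ z, p = i + z := ⟨p - i, by omega⟩
    have hz13 : z < 13 + (PySem.Int.toChars n).length := by omega
    rw [show i + z = (cs.take i).length + z from by omega, pvGetD_append_right] at h1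
    rw [show i + z + 1 = (cs.take i).length + (z + 1) from by omega, pvGetD_append_right] at h2
    have hra : pvRepl n ++ d =
        ['\\', 't', 'i', 'm', 'e', 's', ' ', '1', '0', '^', '{', '-'] ++
          (PySem.Int.toChars n ++ '}' :: d) := by
      simp [pvRepl]
    rw [hra] at h1 h2
    rcases Nat.lt_trichotomy z 12 with hz | hz | hz
    · -- inside the literal "\times 10^{-": 'e' only at offset 4, followed by 's'
      rw [pvGetD_append_left _ _ _ (by simpa using hz)] at h1
      have hz4 : z = 4 := by interval_cases z <;> (revert h1; decide)
      subst hz4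
      rw [pvGetD_append_left _ _ _ (by decide)] at h2
      revert h2; decide
    · -- offset 12 is the first character of str(n) (or '}'), never 'e' next to '-'
      subst hz
      rw [show (12 : Nat) =
            (['\\', 't', 'i', 'm', 'e', 's', ' ', '1', '0', '^', '{', '-'] : List Char).length + 0
          from by decide, pvGetD_append_right] at h1
      rcases hn : PySem.Int.toChars n with - | ⟨c0, cr⟩
      · rw [hn] at h1; simp at h1
      · rw [hn] at h1
        simp only [List.getD_cons_zero, List.cons_append] at h1
        exact pvToChars_no_e n c0 (by rw [hn]; exact List.mem_cons_self) h1
    · -- strictly inside str(n) ++ "}"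
      have h1' : (PySem.Int.toChars n ++ '}' :: d).getD (z - 12) ' ' = 'e' := by
        rw [show z =
              (['\\', 't', 'i', 'm', 'e', 's', ' ', '1', '0', '^', '{', '-'] : List Char).length +
                (z - 12) from by simp; omega, pvGetD_append_right] at h1
        exact h1
      rcases Nat.lt_trichotomy (z - 12) (PySem.Int.toChars n).length with hy | hy | hy
      · rw [pvGetD_append_left _ _ _ hy] at h1'
        exact pvToChars_no_e n _
          (by rw [List.getD_eq_getElem _ _ hy]; exact List.getElem_mem _) h1'
      · rw [show z - 12 = (PySem.Int.toChars n).length + 0 from by omega,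
            pvGetD_append_right] at h1'
        simp at h1'
      · omega
theorem pvDrop_append_right (q d : List Char) (m : Nat) :
    (q ++ d).drop (q.length + m) = d.drop m := by
  rw [List.drop_append]
  simp

theorem pvFind_append_clean (q d : List Char) (h : pvClean q d) :
    PySem.Chars.find (q ++ d) ['e', '-'] =
      if PySem.Chars.find d ['e', '-'] = -1 then -1
      else (q.length : Int) + PySem.Chars.find d ['e', '-'] := by
  by_cases hf : PySem.Chars.find d ['e', '-'] = -1
  · rw [if_pos hf]
    rw [PySem.Chars.find_eq_neg_one_iff] at hf ⊢
    intro hinf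
    obtain ⟨p, hp⟩ := (PySem.Chars.exists_prefix_drop_iff_isIn _ _).mpr
      ((PySem.Chars.isIn_iff_infix _ _).mpr hinf)
    by_cases hpq : p < q.length
    · exact h p hpq hp
    · apply hf
      apply (PySem.Chars.isIn_iff_infix _ _).mp
      apply (PySem.Chars.exists_prefix_drop_iff_isIn _ _).mp
      refine ⟨p - q.length, ?_⟩
      rwa [show p = q.length + (p - q.length) from by omega, pvDrop_append_right] at hp
  · rw [if_neg hf]
    have h0 : 0 ≤ PySem.Chars.find d ['e', '-'] := by
      have := PySem.Chars.neg_one_le_find (s := d) (sub := ['e', '-'])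
      omega
    obtain ⟨hpre, hmin⟩ := PySem.Chars.find_spec h0
    have := pvFind_eq_of_first (q ++ d) ['e', '-']
      (q.length + (PySem.Chars.find d ['e', '-']).toNat)
      (by rw [pvDrop_append_right]; exact hpre)
      (by
        intro p hp hpat
        by_cases hpq : p < q.length
        · exact h p hpq hpat
        · refine hmin (p - q.length) (by omega) ?_
          rwa [show p = q.length + (p - q.length) from by omega, pvDrop_append_right] at hpat)
    rw [this]
    push_cast [Int.toNat_of_nonneg h0]
    ring

theorem pvOcc_append_clean (q d : List Char) (h : pvClean q d) : pvOcc (q ++ d) = pvOcc d := by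
  unfold pvOcc
  rw [List.length_append, List.range_add, List.countP_append, List.countP_map]
  have h1 : (List.range q.length).countP (fun p => decide (['e', '-'] <+: (q ++ d).drop p)) = 0 := by
    rw [List.countP_eq_zero]
    intro p hp
    simp only [List.mem_range] at hp
    simpa using h p hp
  have h2 : ∀ x ∈ List.range d.length,
      ((fun p => decide (['e', '-'] <+: (q ++ d).drop p)) ∘ (fun x => q.length + x)) x =
      (fun p => decide (['e', '-'] <+: d.drop p)) x := by
    intro x _
    simp only [Function.comp_apply]
    rw [pvDrop_append_right]
  rw [h1, List.countP_congr (fun x hx => by rw [h2 x hx])]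
  omega

theorem pvOcc_drop_lt (cs : List Char) (i k : Nat) (hik : i < k) (hk : k ≤ cs.length)
    (hi : ['e', '-'] <+: cs.drop i) : pvOcc (cs.drop k) < pvOcc cs := by
  unfold pvOcc
  rw [List.length_drop]
  conv_rhs => rw [show cs.length = k + (cs.length - k) from by omega, List.range_add]
  rw [List.countP_append, List.countP_map]
  have hcongr : (List.range (cs.length - k)).countP
      (fun p => decide (['e', '-'] <+: (cs.drop k).drop p)) =
      (List.range (cs.length - k)).countP
      ((fun p => decide (['e', '-'] <+: cs.drop p)) ∘ (fun x => k + x)) :=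
    List.countP_congr (fun x hx => by
      simp [Function.comp_apply, List.drop_drop])
  rw [hcongr]
  have h1 : 0 < (List.range k).countP (fun p => decide (['e', '-'] <+: cs.drop p)) := by
    rw [List.countP_pos_iff]
    exact ⟨i, List.mem_range.mpr hik, by simpa using hi⟩
  omega

theorem pvPreL_append_clean (q d : List Char) (h : pvClean q d) (hd : pvPreL d) :
    pvPreL (q ++ d) := by
  intro i hi he hdm
  have hlen : i + 1 < (q ++ d).length := by
    by_contra hl
    rw [List.getD_eq_default _ _ (by omega)] at hdm
    exact absurd hdm (by decide)
  have hocc : ['e', '-'] <+: (q ++ d).drop i := (pvOccAt_iff _ _).mpr ⟨he, hdm, hlen⟩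
  have hiq : ¬ i < q.length := fun hlt => h i hlt hocc
  obtain ⟨x, rfl⟩ : ∃ x, i = q.length + x := ⟨i - q.length, by omega⟩
  rw [pvDrop_append_right] at hocc
  obtain ⟨he', hd', hl'⟩ := (pvOccAt_iff d x).mp hocc
  obtain ⟨hdig, j, hj, hij, hnd⟩ := hd x (by omega) he' hd'
  refine ⟨?_, q.length + j, by simp; omega, by omega, ?_⟩
  · rw [show q.length + x + 2 = q.length + (x + 2) from by omega, pvGetD_append_right]
    exact hdig
  · rw [pvGetD_append_right]
    exact hnd

theorem pvTake_append_right (q d : List Char) (m : Nat) :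
    (q ++ d).take (q.length + m) = q ++ d.take m := by
  rw [List.take_append]
  simp

theorem pvLoopB_append_clean (fuel : Nat) (q d : List Char) (h : pvClean q d) :
    pvLoopB fuel (q ++ d) = q ++ pvLoopB fuel d := by
  cases fuel with
  | zero => simp [pvLoopB]
  | succ fuel =>
    by_cases hf : PySem.Chars.find d ['e', '-'] = -1
    · simp only [pvLoopB]
      rw [pvFind_append_clean q d h, hf]
      norm_num
    · have hneg : -1 ≤ PySem.Chars.find d ['e', '-'] := PySem.Chars.neg_one_le_find d ['e', '-']
      obtain ⟨m, hfd⟩ : ∃ m : Nat, PySem.Chars.find d ['e', '-'] = (m : Int) :=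
        ⟨(PySem.Chars.find d ['e', '-']).toNat, (Int.toNat_of_nonneg (by omega)).symm⟩
      have hfind : PySem.Chars.find (q ++ d) ['e', '-'] = ((q.length + m : Nat) : Int) := by
        rw [pvFind_append_clean q d h, if_neg hf, hfd]
        omega
      simp only [pvLoopB, hfind, hfd]
      rw [if_pos (show ((q.length + m : Nat) : Int) > -1 from by omega),
          if_pos (show ((m : Nat) : Int) > -1 from by omega)]
      simp only [Int.toNat_natCast]
      rw [show q.length + m + 2 = q.length + (m + 2) from by omega,
          pvDrop_append_right, pvTake_append_right]
      by_cases hrun : (d.drop (m + 2)).takeWhile Char.isDigit = []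
      · rw [if_pos hrun, if_pos hrun, List.append_assoc]
      · rw [if_neg hrun, if_neg hrun]
        cases hoc : PySem.Int.ofChars? ((d.drop (m + 2)).takeWhile Char.isDigit) with
        | none => rfl
        | some n =>
          rw [show q.length + m = q.length + m from rfl]
          rw [show (q ++ d).take (q.length + m) = q ++ d.take m from pvTake_append_right q d m]
          rw [show q.length + (m + 2) + ((d.drop (m + 2)).takeWhile Char.isDigit).length
                = q.length + (m + 2 + ((d.drop (m + 2)).takeWhile Char.isDigit).length)
              from by omega, pvDrop_append_right]
          simp [List.append_assoc]

theorem pvMain (fuel : Nat) (cs : List Char) (hpre : pvPreL cs) (hfuel : pvOcc cs < fuel) :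
    pvLoopA fuel cs = pvLoopB fuel cs := by
  induction fuel generalizing cs with
  | zero => omega
  | succ fuel ih =>
    by_cases hfind : PySem.Chars.find cs ['e', '-'] > -1
    · have h0 : 0 ≤ PySem.Chars.find cs ['e', '-'] := by omega
      obtain ⟨i, hfi⟩ : ∃ i : Nat, PySem.Chars.find cs ['e', '-'] = (i : Int) :=
        ⟨(PySem.Chars.find cs ['e', '-']).toNat, (Int.toNat_of_nonneg h0).symm⟩
      obtain ⟨hocc, hmin⟩ := PySem.Chars.find_spec h0
      have hitn : (PySem.Chars.find cs ['e', '-']).toNat = i := by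
        rw [hfi]; exact Int.toNat_natCast i
      rw [hitn] at hocc hmin
      obtain ⟨he, hdm, hl1⟩ := (pvOccAt_iff cs i).mp hocc
      obtain ⟨hdig, j, hj, hij, hnd⟩ := hpre i (by omega) he hdm
      have hi2 : i + 2 < cs.length := by
        by_contra hge
        rw [List.getD_eq_default _ _ (by omega)] at hdig
        exact absurd hdig (by decide)
      have hdc : cs.drop (i + 2) = cs[i + 2] :: cs.drop (i + 3) := List.drop_eq_getElem_cons hi2
      have hdig' : (cs[i + 2]'hi2).isDigit = true := by
        rw [← List.getD_eq_getElem cs ' ' hi2]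
        exact hdig
      have hrunne : (cs.drop (i + 2)).takeWhile Char.isDigit ≠ [] := by
        rw [hdc, List.takeWhile_cons, hdig']
        simp
      have hterm : i + 2 + ((cs.drop (i + 2)).takeWhile Char.isDigit).length < cs.length := by
        by_contra hge
        have hlen1 : ((cs.drop (i + 2)).takeWhile Char.isDigit).length ≤ cs.length - (i + 2) := by
          have := (List.takeWhile_prefix (l := cs.drop (i + 2)) Char.isDigit).length_le
          simpa using this
        have heq : (cs.drop (i + 2)).takeWhile Char.isDigit = cs.drop (i + 2) :=
          (List.takeWhile_prefix _).eq_of_length (by simp; omega)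
        have hall := List.takeWhile_eq_self_iff.mp heq
        have hjmem : cs[j]'hj ∈ cs.drop (i + 2) := by
          have : (cs.drop (i + 2))[j - (i + 2)]? = cs[j]? := by
            rw [List.getElem?_drop, show i + 2 + (j - (i + 2)) = j from by omega]
          exact List.mem_of_getElem? (by rw [this]; exact List.getElem?_eq_getElem hj)
        have := hall _ hjmem
        rw [← List.getD_eq_getElem cs ' ' hj] at this
        rw [hnd] at this
        exact Bool.noConfusion this
      have hscan : pvScanA cs (i + 2) =
          some (i + 2 + ((cs.drop (i + 2)).takeWhile Char.isDigit).length) := by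
        rw [pvScanA_spec, if_pos hterm]
      have hsl : PySem.List.slice cs (some ((i : Int) + 2))
          (some ((i + 2 + ((cs.drop (i + 2)).takeWhile Char.isDigit).length : Nat) : Int)) =
          (cs.drop (i + 2)).takeWhile Char.isDigit := by
        rw [show ((i : Int) + 2) = ((i + 2 : Nat) : Int) from by push_cast; ring,
            PySem.List.slice_natCast,
            show i + 2 + ((cs.drop (i + 2)).takeWhile Char.isDigit).length - (i + 2)
              = ((cs.drop (i + 2)).takeWhile Char.isDigit).length from by omega]
        exact (List.prefix_iff_eq_take.mp (List.takeWhile_prefix _)).symm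
      simp only [pvLoopA, pvLoopB, hfi, Int.toNat_natCast]
      rw [if_pos (show (i : Int) > -1 from by omega),
          if_pos (show (i : Int) > -1 from by omega), hscan]
      simp only [Option.getD_some]
      rw [hsl, if_neg hrunne]
      cases hoc : PySem.Int.ofChars? ((cs.drop (i + 2)).takeWhile Char.isDigit) with
      | none => rfl
      | some n =>
        rw [PySem.List.slice_to_natCast, PySem.List.slice_from_natCast]
        show pvLoopA fuel (cs.take i ++ pvRepl n ++
            cs.drop (i + 2 + ((cs.drop (i + 2)).takeWhile Char.isDigit).length)) =
          cs.take i ++ pvRepl n ++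
            pvLoopB fuel (cs.drop (i + 2 + ((cs.drop (i + 2)).takeWhile Char.isDigit).length))
        have hclean : pvClean (cs.take i ++ pvRepl n)
            (cs.drop (i + 2 + ((cs.drop (i + 2)).takeWhile Char.isDigit).length)) :=
          pvClean_repl cs _ i n hmin (by omega)
        have hasc : cs.take i ++ pvRepl n ++
            cs.drop (i + 2 + ((cs.drop (i + 2)).takeWhile Char.isDigit).length) =
            (cs.take i ++ pvRepl n) ++
            cs.drop (i + 2 + ((cs.drop (i + 2)).takeWhile Char.isDigit).length) := by
          rw [List.append_assoc]
        have hpret : pvPreL (cs.take i ++ pvRepl n ++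
            cs.drop (i + 2 + ((cs.drop (i + 2)).takeWhile Char.isDigit).length)) := by
          rw [hasc]
          exact pvPreL_append_clean _ _ hclean (pvPreL_drop cs _ hpre)
        have hocct : pvOcc (cs.take i ++ pvRepl n ++
            cs.drop (i + 2 + ((cs.drop (i + 2)).takeWhile Char.isDigit).length)) < fuel := by
          rw [hasc, pvOcc_append_clean _ _ hclean]
          have := pvOcc_drop_lt cs i (i + 2 + ((cs.drop (i + 2)).takeWhile Char.isDigit).length)
            (by omega) (by omega) hocc
          omega
        rw [ih _ hpret hocct, hasc, pvLoopB_append_clean fuel _ _ hclean, List.append_assoc]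
    · simp only [pvLoopA, pvLoopB]
      rw [if_neg hfind, if_neg hfind]

theorem pvOcc_le (cs : List Char) : pvOcc cs ≤ cs.length := by
  unfold pvOcc
  calc List.countP _ (List.range cs.length) ≤ (List.range cs.length).length :=
        List.countP_le_length
    _ = cs.length := by simp

-- ===== VERDICT (by name: the statement is the Claim_ definition above) =====
theorem ReplaceEngineeringNotation_spec : Claim_equal_ReplaceEngineeringNotation := by
  intro text _ hpre
  unfold Spec_ReplaceEngineeringNotation ReplaceEngineeringNotation ReplaceEngineeringNotation_alt
  exact congrArg String.ofList
    (pvMain _ _ hpre (Nat.lt_succ_of_le (pvOcc_le text.toList)))
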